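-- pv_equiv track=rewrite | github.com/ShuyRoy/Hybrid-SPM-with-SRAM-and-RM | other_algorithms/SOA.py | count_degree
-- ===== SOURCE A (Python) =====
-- def count_degree(V,E):
--     degree=[]
--     count = 0
--     for i in V:
--         for j in E:
--             if i in j:
--                 count = count +1
--             else:
--                 continue
--         degree.append([i, count])
--         count = 0
--     return degree
-- ===== SOURCE B (Python) =====
-- def count_degree(V, E):
--     cnt = {}
--     for e in E:
--         for v in set(e):
--             cnt[v] = cnt.get(v, 0) + 1
--     return [[v, cnt.get(v, 0)] for v in V]
-- ===== Notes on version B (the rewrite author's own statement) =====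
-- stated objective: faster
-- what changed: Replaces the per-vertex scan of all edges by one pass over the edges building a degree counter dict, then a per-vertex O(1) lookup.
import Mathlib
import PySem

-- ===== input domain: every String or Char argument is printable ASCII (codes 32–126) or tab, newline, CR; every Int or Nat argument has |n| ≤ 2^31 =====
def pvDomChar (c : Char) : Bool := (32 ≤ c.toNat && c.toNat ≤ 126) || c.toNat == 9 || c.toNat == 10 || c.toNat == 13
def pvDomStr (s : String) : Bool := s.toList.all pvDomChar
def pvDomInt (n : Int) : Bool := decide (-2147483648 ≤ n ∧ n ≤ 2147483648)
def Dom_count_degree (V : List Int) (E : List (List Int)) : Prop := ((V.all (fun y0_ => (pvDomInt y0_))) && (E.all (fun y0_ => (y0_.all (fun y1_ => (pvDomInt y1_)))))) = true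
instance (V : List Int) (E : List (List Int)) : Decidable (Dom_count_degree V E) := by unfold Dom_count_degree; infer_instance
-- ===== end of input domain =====

-- B replaces A's per-vertex scan of all edges by one pass over the edges building a
-- degree counter dict, then a per-vertex lookup (asymptotically faster).

-- ===== PORT A =====
def count_degree (V : List Int) (E : List (List Int)) : List (List Int) :=
  (V.foldl (fun (st : List (List Int) × Int) i =>
      let count := E.foldl (fun count j => if i ∈ j then count + 1 else count) st.2
      (st.1 ++ [[i, count]], 0)) ([], 0)).1

-- ===== PORT B =====
def count_degree_alt (V : List Int) (E : List (List Int)) : List (List Int) :=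
  let cnt : PySem.Dict Int Int :=
    E.foldl (fun d e => (PySem.Set.ofList e).foldl (fun d v => d.insert v (d.getD v 0 + 1)) d)
      PySem.Dict.empty
  V.map (fun v => [v, cnt.getD v 0])

-- ===== PRECONDITION & SPEC =====
def Spec_count_degree (V : List Int) (E : List (List Int)) (out : List (List Int)) : Prop := out = count_degree_alt V E
instance (V : List Int) (E : List (List Int)) (out : List (List Int)) : Decidable (Spec_count_degree V E out) := by unfold Spec_count_degree; infer_instance

-- ===== CLAIM (what is proved, stated in full; the proofs are below) =====
def Claim_equal_count_degree : Prop := ∀ (V : List Int) (E : List (List Int)), Dom_count_degree V E → Spec_count_degree V E (count_degree V E)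

-- ===== LEMMAS AND PROOFS =====

-- A's inner loop counts the edges containing i
theorem inner_count (i : Int) (E : List (List Int)) (c : Int) :
    E.foldl (fun count j => if i ∈ j then count + 1 else count) c
      = c + (E.countP (fun j => decide (i ∈ j)) : Int) := by
  induction E generalizing c with
  | nil => simp
  | cons e E ih =>
    simp only [List.foldl_cons, List.countP_cons, ih]
    by_cases h : i ∈ e <;> simp [h] <;> try ring

-- B's counter: the lookup of v after folding the edges adds one per edge containing v
theorem cnt_getD (E : List (List Int)) (d : PySem.Dict Int Int) (v : Int) :
    (E.foldl (fun d e => (PySem.Set.ofList e).foldl (fun d v => d.insert v (d.getD v 0 + 1)) d) d).getD v 0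
      = d.getD v 0 + (E.countP (fun j => decide (v ∈ j)) : Int) := by
  induction E generalizing d with
  | nil => simp
  | cons e E ih =>
    simp only [List.foldl_cons, List.countP_cons, ih,
      PySem.Dict.getD_foldl_insert_add_one]
    have hc : (PySem.Set.ofList e).count v = if v ∈ e then 1 else 0 := by
      by_cases h : v ∈ e
      · simp [h, List.count_eq_one_of_mem ((PySem.Set.mem_ofList e v).2 h)
          (PySem.Set.nodup_ofList e)]
      · simp [h, List.count_eq_zero_of_not_mem
          (fun hm => h ((PySem.Set.mem_ofList e v).1 hm))]
    by_cases h : v ∈ e <;> simp [hc, h] <;> try ring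

-- A's outer loop, with the counter always re-entering as 0, builds the map
theorem outer_fold (V : List Int) (E : List (List Int)) (acc : List (List Int)) :
    (V.foldl (fun (st : List (List Int) × Int) i =>
        (st.1 ++ [[i, E.foldl (fun count j => if i ∈ j then count + 1 else count) st.2]], 0))
      (acc, 0)).1
      = acc ++ V.map (fun i => [i, (E.countP (fun j => decide (i ∈ j)) : Int)]) := by
  induction V generalizing acc with
  | nil => simp
  | cons i V ih =>
    rw [List.foldl_cons]
    rw [ih, inner_count]
    simp

-- ===== VERDICT (by name: the statement is the Claim_ definition above) =====
theorem count_degree_spec : Claim_equal_count_degree := by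
  intro V E _
  show count_degree V E = count_degree_alt V E
  unfold count_degree count_degree_alt
  simp only [outer_fold V E [], cnt_getD, PySem.Dict.getD_empty, List.nil_append, zero_add]
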